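-- pv_equiv track=rewrite | github.com/hb885874/bug-hunter | phases/analysis.py | cluster_hosts
-- ===== SOURCE A (Python) =====
-- from collections import defaultdict
--
-- def cluster_hosts(hosts: str):
--     clusters = defaultdict(list)
--
--     for host in hosts.splitlines():
--         if host.startswith(("api.", "graphql.", "rest.")):
--             clusters["api"].append(host)
--         elif host.startswith(("dev.", "test.", "staging.", "qa.")):
--             clusters["dev"].append(host)
--         elif host.startswith(("auth.", "login.", "sso.", "id.")):
--             clusters["auth"].append(host)
--         elif host.startswith(("www.",)):
--             clusters["prod"].append(host)
--         else:
--             clusters["misc"].append(host)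
--
--     return dict(clusters)
-- ===== SOURCE B (Python) =====
-- RULES = [
--     ("api", ("api.", "graphql.", "rest.")),
--     ("dev", ("dev.", "test.", "staging.", "qa.")),
--     ("auth", ("auth.", "login.", "sso.", "id.")),
--     ("prod", ("www.",)),
-- ]
--
--
-- def _classify(host):
--     for cat, prefixes in RULES:
--         if host.startswith(prefixes):
--             return cat
--     return "misc"
--
--
-- def cluster_hosts(hosts: str):
--     labeled = [(_classify(h), h) for h in hosts.splitlines()]
--     order = dict.fromkeys(c for c, _ in labeled)
--     return {c: [h for k, h in labeled if k == c] for c in order}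
-- ===== Notes on version B (the rewrite author's own statement) =====
-- stated objective: idiomatic
-- what changed: A fills a defaultdict incrementally with an if/elif chain inside one loop; B first labels every line via an ordered rules table (classify pass), then builds each category's list by a per-category comprehension over the labelled pairs, with keys in first-appearance order.
import Mathlib
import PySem

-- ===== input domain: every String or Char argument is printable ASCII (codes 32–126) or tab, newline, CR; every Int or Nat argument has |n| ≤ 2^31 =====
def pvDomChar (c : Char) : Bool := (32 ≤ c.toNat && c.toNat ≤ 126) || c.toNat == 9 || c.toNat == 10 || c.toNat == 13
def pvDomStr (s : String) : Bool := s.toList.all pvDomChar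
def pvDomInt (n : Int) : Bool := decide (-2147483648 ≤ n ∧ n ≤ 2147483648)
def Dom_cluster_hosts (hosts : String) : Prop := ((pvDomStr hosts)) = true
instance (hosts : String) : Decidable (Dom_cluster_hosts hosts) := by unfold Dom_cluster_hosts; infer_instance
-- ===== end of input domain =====

-- B replaces A's incremental defaultdict loop by classify-then-group (label every line once via a
-- rules table, then build each category's list by a comprehension, keys in first-appearance order):
-- idiomatic, same cost.

-- ===== PORT A =====
def cluster_hosts (hosts : String) : List (String × List String) :=
  (List.foldl (fun (clusters : PySem.Dict String (List String)) (host : String) =>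
      if PySem.Str.startswith host "api." || PySem.Str.startswith host "graphql." || PySem.Str.startswith host "rest." then
        clusters.modify "api" [] (fun l => l ++ [host])
      else if PySem.Str.startswith host "dev." || PySem.Str.startswith host "test." || PySem.Str.startswith host "staging." || PySem.Str.startswith host "qa." then
        clusters.modify "dev" [] (fun l => l ++ [host])
      else if PySem.Str.startswith host "auth." || PySem.Str.startswith host "login." || PySem.Str.startswith host "sso." || PySem.Str.startswith host "id." then
        clusters.modify "auth" [] (fun l => l ++ [host])
      else if PySem.Str.startswith host "www." then
        clusters.modify "prod" [] (fun l => l ++ [host])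
      else
        clusters.modify "misc" [] (fun l => l ++ [host]))
    PySem.Dict.empty (PySem.Str.splitlines hosts)).items

-- ===== PORT B =====
def pvRules : List (String × List String) :=
  [("api", ["api.", "graphql.", "rest."]),
   ("dev", ["dev.", "test.", "staging.", "qa."]),
   ("auth", ["auth.", "login.", "sso.", "id."]),
   ("prod", ["www."])]

def pvClassify (host : String) : String :=
  match pvRules.find? (fun r => r.2.any (fun p => PySem.Str.startswith host p)) with
  | some r => r.1
  | none => "misc"

def cluster_hosts_alt (hosts : String) : List (String × List String) :=
  let labeled := (PySem.Str.splitlines hosts).map (fun h => (pvClassify h, h))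
  let order := PySem.List.dedup (labeled.map Prod.fst)
  order.map (fun c => (c, (labeled.filter (fun p => p.1 == c)).map Prod.snd))

-- ===== PRECONDITION & SPEC =====
def Spec_cluster_hosts (hosts : String) (out : List (String × List String)) : Prop := out = cluster_hosts_alt hosts
instance (hosts : String) (out : List (String × List String)) : Decidable (Spec_cluster_hosts hosts out) := by unfold Spec_cluster_hosts; infer_instance

-- ===== CLAIM (what is proved, stated in full; the proofs are below) =====
def Claim_equal_cluster_hosts : Prop := ∀ (hosts : String), Dom_cluster_hosts hosts → Spec_cluster_hosts hosts (cluster_hosts hosts)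

-- ===== LEMMAS AND PROOFS =====

-- A's if/elif chain picks exactly the category pvClassify computes.
theorem stepA_eq (d : PySem.Dict String (List String)) (host : String) :
    (if PySem.Str.startswith host "api." || PySem.Str.startswith host "graphql." || PySem.Str.startswith host "rest." then
        d.modify "api" [] (fun l => l ++ [host])
      else if PySem.Str.startswith host "dev." || PySem.Str.startswith host "test." || PySem.Str.startswith host "staging." || PySem.Str.startswith host "qa." then
        d.modify "dev" [] (fun l => l ++ [host])
      else if PySem.Str.startswith host "auth." || PySem.Str.startswith host "login." || PySem.Str.startswith host "sso." || PySem.Str.startswith host "id." then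
        d.modify "auth" [] (fun l => l ++ [host])
      else if PySem.Str.startswith host "www." then
        d.modify "prod" [] (fun l => l ++ [host])
      else
        d.modify "misc" [] (fun l => l ++ [host]))
    = d.modify (pvClassify host) [] (fun l => l ++ [host]) := by
  unfold pvClassify pvRules
  simp only [List.find?, List.any, Bool.or_false, Bool.or_assoc]
  generalize (PySem.Str.startswith host "api." || (PySem.Str.startswith host "graphql." || PySem.Str.startswith host "rest.")) = b1
  generalize (PySem.Str.startswith host "dev." || (PySem.Str.startswith host "test." || (PySem.Str.startswith host "staging." || PySem.Str.startswith host "qa."))) = b2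
  generalize (PySem.Str.startswith host "auth." || (PySem.Str.startswith host "login." || (PySem.Str.startswith host "sso." || PySem.Str.startswith host "id."))) = b3
  generalize (PySem.Str.startswith host "www.") = b4
  cases b1 <;> cases b2 <;> cases b3 <;> cases b4 <;> rfl

theorem dedup_append_singleton {α : Type} [BEq α] [LawfulBEq α] (xs : List α) (x : α) :
    PySem.List.dedup (xs ++ [x])
      = if x ∈ xs then PySem.List.dedup xs else PySem.List.dedup xs ++ [x] := by
  have h : PySem.List.dedup (xs ++ [x]) = PySem.Set.add (PySem.List.dedup xs) x := by
    simp [PySem.List.dedup, PySem.Set.ofList, List.foldl_append]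
  rw [h]
  simp only [PySem.Set.add, PySem.Set.contains]
  by_cases hx : x ∈ xs <;>
    simp [hx, List.contains_eq_mem]

-- the grouping dictionary built by A's fold, described item-by-item
theorem items_fold_modify (key : String → String) (lines : List String) :
    (lines.foldl (fun (d : PySem.Dict String (List String)) h => d.modify (key h) [] (fun v => v ++ [h])) PySem.Dict.empty).items
    = (PySem.List.dedup (lines.map key)).map (fun c => (c, lines.filter (fun h => key h == c))) := by
  induction lines using List.reverseRecOn with
  | nil => rfl
  | append_singleton lines h IH =>
    rw [List.foldl_append]
    set D := lines.foldl (fun (d : PySem.Dict String (List String)) h => d.modify (key h) [] (fun v => v ++ [h])) PySem.Dict.empty with hD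
    have hkeys : D.keys = PySem.List.dedup (lines.map key) := by
      simp [PySem.Dict.keys, IH, List.map_map, Function.comp_def]
    have hnodup : D.keys.Nodup := by rw [hkeys]; exact PySem.List.nodup_dedup (lines.map key)
    simp only [List.foldl_cons, List.foldl_nil, PySem.Dict.modify]
    by_cases hk : key h ∈ lines.map key
    · have hmemd : key h ∈ PySem.List.dedup (lines.map key) := (PySem.List.mem_dedup (lines.map key) _).mpr hk
      have hc : D.contains (key h) = true := by
        rw [PySem.Dict.contains_iff_mem_keys, hkeys]; exact hmemd
      have hitem : (key h, lines.filter (fun x => key x == key h)) ∈ D.items := by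
        rw [IH]; exact List.mem_map.mpr ⟨key h, hmemd, rfl⟩
      have hgetD := PySem.Dict.getD_of_mem_items D hitem hnodup []
      rw [PySem.Dict.items_insert_of_contains D _ hc, hgetD, IH]
      rw [List.map_append]
      simp only [List.map_cons, List.map_nil]
      rw [dedup_append_singleton]
      simp only [hk, if_pos, List.map_map]
      refine List.map_congr_left (fun c hc' => ?_)
      by_cases hck : c = key h
      · subst hck; simp [List.filter_append]
      · have hb : (c == key h) = false := by simp [hck]
        have hb2 : (key h == c) = false := by
          simp only [beq_eq_false_iff_ne]; exact Ne.symm hck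
        simp [hb2, List.filter_append, hck]
    · have hc : D.contains (key h) = false := by
        rw [Bool.eq_false_iff]
        intro hcc
        rw [PySem.Dict.contains_iff_mem_keys, hkeys, PySem.List.mem_dedup] at hcc
        exact hk hcc
      have hgetD : D.getD (key h) [] = [] := PySem.Dict.getD_of_not_contains D [] hc
      rw [PySem.Dict.items_insert_of_not_contains D _ hc, hgetD, IH]
      rw [List.map_append]
      simp only [List.map_cons, List.map_nil]
      rw [dedup_append_singleton]
      simp only [hk, if_neg, not_false_iff, List.map_append]
      congr 1
      · refine List.map_congr_left (fun c hc' => ?_)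
        have hck : c ≠ key h := by
          intro he
          exact hk (he ▸ (PySem.List.mem_dedup (lines.map key) c).mp hc')
        have hb2 : (key h == c) = false := by
          simp only [beq_eq_false_iff_ne]; exact Ne.symm hck
        simp [List.filter_append, hb2]
      · have hfilt : lines.filter (fun x => key x == key h) = [] := by
          rw [List.filter_eq_nil_iff]
          intro a ha hbe
          exact hk ((beq_iff_eq.mp hbe) ▸ List.mem_map_of_mem ha)
        simp [List.filter_append, hfilt]

-- ===== VERDICT (by name: the statement is the Claim_ definition above) =====
theorem cluster_hosts_spec : Claim_equal_cluster_hosts := by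
  intro hosts _
  unfold Spec_cluster_hosts cluster_hosts cluster_hosts_alt
  simp only [stepA_eq]
  rw [items_fold_modify pvClassify]
  simp [List.map_map, List.filter_map, Function.comp_def]
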